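-- pv_equiv track=rewrite | github.com/sethia-shubhamm/Crypt-Talk | server/steganography/simple_text_stego.py | _extract_binary_from_spacing
-- ===== SOURCE A (Python) =====
-- def _extract_binary_from_spacing(text):
--     """Extract binary data from spacing patterns between words"""
--
--     # Look for double spaces (bit 1) vs single spaces (bit 0)
--     binary_bits = []
--
--     i = 0
--     while i < len(text):
--         if text[i] == ' ':
--             if i + 1 < len(text) and text[i + 1] == ' ':
--                 binary_bits.append('1')  # Double space = 1
--                 i += 2  # Skip both spaces
--             else:
--                 binary_bits.append('0')  # Single space = 0
--                 i += 1
--         else: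
--             i += 1
--
--     return ''.join(binary_bits)
-- ===== SOURCE B (Python) =====
-- def _extract_binary_from_spacing(text):
--     """Extract binary data from spacing patterns between words"""
--     # Single pass that counts each maximal run of spaces; a run of length l
--     # encodes '1' * (l // 2) followed by '0' * (l % 2).
--     pieces = []
--     run = 0
--     for c in text:
--         if c == ' ':
--             run += 1
--         else:
--             if run != 0:
--                 pieces.append('1' * (run // 2) + '0' * (run % 2))
--             run = 0
--     if run != 0:
--         pieces.append('1' * (run // 2) + '0' * (run % 2))
--     return ''.join(pieces)
-- ===== Notes on version B (the rewrite author's own statement) =====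
-- stated objective: simpler
-- what changed: B replaces A's manual index walk with variable step (skipping two chars on a double space) by a run-length pass: it counts each maximal run of spaces and emits one piece per run ('1' repeated run//2 times then '0' repeated run%2 times).
import Mathlib
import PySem

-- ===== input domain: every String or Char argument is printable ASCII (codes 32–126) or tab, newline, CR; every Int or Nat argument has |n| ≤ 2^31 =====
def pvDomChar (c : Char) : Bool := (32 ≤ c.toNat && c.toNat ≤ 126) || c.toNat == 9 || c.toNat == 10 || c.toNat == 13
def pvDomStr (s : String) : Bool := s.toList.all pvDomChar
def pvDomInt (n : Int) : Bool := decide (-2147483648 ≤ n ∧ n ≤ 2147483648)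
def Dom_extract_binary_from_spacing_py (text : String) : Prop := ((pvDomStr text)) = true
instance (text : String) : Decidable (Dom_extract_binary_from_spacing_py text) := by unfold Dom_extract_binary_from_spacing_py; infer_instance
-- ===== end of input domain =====

-- B replaces A's manual index walk (i += 2 on a double space) with a run-length pass
-- that counts each maximal run of spaces and emits '1'*(l//2)+'0'*(l%2) per run (simpler).

-- ===== PORT A =====
-- while loop over index i, stepping by 2 past a double space, transcribed as
-- recursion on the remaining suffix of characters.
def goA : List Char → List String
  | [] => []
  | c :: rest =>
    if c = ' ' then
      match rest with
      | c2 :: rest2 => if c2 = ' ' then "1" :: goA rest2 else "0" :: goA (c2 :: rest2)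
      | [] => "0" :: goA []
    else goA rest

def extract_binary_from_spacing_py (text : String) : String :=
  PySem.Str.join "" (goA text.toList)

-- ===== PORT B =====
-- piece emitted for one maximal run of `run` spaces: '1' * (run // 2) + '0' * (run % 2)
def pvEmit (run : Nat) : String :=
  String.ofList (List.replicate (run / 2) '1' ++ List.replicate (run % 2) '0')

-- loop body: accumulate pieces and the current space-run length
def stepB (acc : List String × Nat) (c : Char) : List String × Nat :=
  if c = ' ' then (acc.1, acc.2 + 1)
  else (if acc.2 ≠ 0 then acc.1 ++ [pvEmit acc.2] else acc.1, 0)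

def extract_binary_from_spacing_py_alt (text : String) : String :=
  let r := text.toList.foldl stepB ([], 0)
  PySem.Str.join "" (if r.2 ≠ 0 then r.1 ++ [pvEmit r.2] else r.1)

-- ===== PRECONDITION & SPEC =====
def Spec_extract_binary_from_spacing_py (text : String) (out : String) : Prop := out = extract_binary_from_spacing_py_alt text
instance (text : String) (out : String) : Decidable (Spec_extract_binary_from_spacing_py text out) := by unfold Spec_extract_binary_from_spacing_py; infer_instance

-- ===== CLAIM (what is proved, stated in full; the proofs are below) =====
def Claim_equal_extract_binary_from_spacing_py : Prop := ∀ (text : String), Dom_extract_binary_from_spacing_py text → Spec_extract_binary_from_spacing_py text (extract_binary_from_spacing_py text)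

-- ===== LEMMAS AND PROOFS =====

-- joining with the empty separator is flattening
theorem join_empty (parts : List (List Char)) :
    PySem.Chars.join [] parts = parts.flatten := by
  induction parts with
  | nil => simp [PySem.Chars.join_nil]
  | cons p rest ih =>
    cases rest with
    | nil => simp [PySem.Chars.join_singleton]
    | cons q r => simp [PySem.Chars.join_cons_cons] at ih ⊢; simp [ih]

-- what a block of n spaces followed by a non-space (or end) contributes in A
theorem goA_replicate (n : Nat) (l : List Char) (h : l.head? ≠ some ' ') :
    goA (List.replicate n ' ' ++ l)
      = List.replicate (n / 2) "1" ++ List.replicate (n % 2) "0" ++ goA l := by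
  match n with
  | 0 => simp
  | 1 =>
    cases l with
    | nil => simp [goA]
    | cons c2 l2 =>
      have hc2 : c2 ≠ ' ' := by simpa using h
      simp [goA, hc2]
  | (m + 2) =>
    have hrec := goA_replicate m l h
    have h2 : (m + 2) / 2 = m / 2 + 1 := by omega
    have h3 : (m + 2) % 2 = m % 2 := by omega
    simp [List.replicate_succ, goA, hrec, h2, h3]

-- the run contributions emitted by B, as a recursive description of the fold
def bitsLS : Nat → List Char → List String
  | r, [] => if r ≠ 0 then [pvEmit r] else []
  | r, c :: l =>
    if c = ' ' then bitsLS (r + 1) l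
    else (if r ≠ 0 then [pvEmit r] else []) ++ bitsLS 0 l

theorem foldB_eq (l : List Char) (p : List String) (r : Nat) :
    (let x := l.foldl stepB (p, r)
     if x.2 ≠ 0 then x.1 ++ [pvEmit x.2] else x.1) = p ++ bitsLS r l := by
  induction l generalizing p r with
  | nil => simp [bitsLS]; split <;> simp
  | cons c l ih =>
    by_cases hc : c = ' '
    · simp [bitsLS, hc, stepB, ih]
    · simp [bitsLS, hc, stepB, ih]
      split <;> simp

theorem toList_pvEmit (n : Nat) :
    (pvEmit n).toList = List.replicate (n / 2) '1' ++ List.replicate (n % 2) '0' := by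
  simp [pvEmit]

-- core equivalence at the level of character lists
theorem bits_eq_goA (l : List Char) (n : Nat) :
    ((bitsLS n l).map String.toList).flatten
      = ((goA (List.replicate n ' ' ++ l)).map String.toList).flatten := by
  induction l generalizing n with
  | nil =>
    rw [goA_replicate n [] (by simp)]
    simp only [bitsLS]
    by_cases hn : n = 0
    · subst hn; simp [goA]
    · rw [if_pos hn]
      simp [toList_pvEmit, List.map_replicate, goA]
  | cons c l ih =>
    by_cases hc : c = ' '
    · subst hc
      have hrep : List.replicate n ' ' ++ ' ' :: l = List.replicate (n + 1) ' ' ++ l := by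
        simp [List.replicate_succ']
      rw [hrep]
      have hb : bitsLS n (' ' :: l) = bitsLS (n + 1) l := by rfl
      rw [hb]
      exact ih (n + 1)
    · have hb : bitsLS n (c :: l) = (if n ≠ 0 then [pvEmit n] else []) ++ bitsLS 0 l := by
        simp [bitsLS, hc]
      have ih0 := ih 0
      simp only [List.replicate_zero, List.nil_append] at ih0
      rw [goA_replicate n (c :: l) (by simpa using hc), hb]
      have hgo : goA (c :: l) = goA l := by cases l <;> simp [goA, hc]
      rw [hgo]
      by_cases hn : n = 0
      · subst hn; simpa using ih0
      · rw [if_pos hn]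
        simp [toList_pvEmit, List.map_replicate, ih0]

-- ===== VERDICT (by name: the statement is the Claim_ definition above) =====
theorem extract_binary_from_spacing_py_spec : Claim_equal_extract_binary_from_spacing_py := by
  intro text _
  unfold Spec_extract_binary_from_spacing_py extract_binary_from_spacing_py extract_binary_from_spacing_py_alt
  apply String.toList_inj.mp
  rw [PySem.Str.toList_join, PySem.Str.toList_join]
  show PySem.Chars.join [] _ = PySem.Chars.join [] _
  rw [join_empty, join_empty]
  rw [foldB_eq text.toList [] 0]
  have := bits_eq_goA text.toList 0
  simp only [List.replicate_zero, List.nil_append] at this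
  simpa using this.symm
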